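-- pv_equiv track=rewrite | github.com/haylibi/decision_trees | src/run.py | values_counter
-- ===== SOURCE A (Python) =====
-- def order_vector(dic, pos):
--     '''retorna uma lista ordenada e convertida do atributo numero X associado a sua classe'''
--     v1 = []
--     for line in dic.items():
--         if line[0] == list(dic)[0]:	continue
--         v1.append([line[1][pos],line[1][-1]])
--     return sorted(v1)
--
-- def values_counter(dic):
-- 	vec = order_vector(dic, -1)
-- 	counter = {}
-- 	for value in vec:
-- 		if not(value[-1] in list(counter)):
-- 			counter[value[-1]] = 0
-- 		counter[value[-1]] += 1
-- 	return counter
-- ===== SOURCE B (Python) =====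
-- def values_counter(dic):
--     labels = sorted(v[-1] for v in list(dic.values())[1:])
--     out = {}
--     rest = labels
--     while rest:
--         run = 1
--         while run < len(rest) and rest[run] == rest[0]:
--             run += 1
--         out[rest[0]] = run
--         rest = rest[run:]
--     return out
-- ===== Notes on version B (the rewrite author's own statement) =====
-- stated objective: faster
-- what changed: A sorts [label,label] pairs and counts them with a dict accumulator, rebuilding list(dic) and list(counter) on every iteration; B sorts the bare labels once and run-length-encodes the sorted list with a two-pointer scan, writing the dict once per distinct label with no membership tests or per-element rebuilds.
import Mathlib
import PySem

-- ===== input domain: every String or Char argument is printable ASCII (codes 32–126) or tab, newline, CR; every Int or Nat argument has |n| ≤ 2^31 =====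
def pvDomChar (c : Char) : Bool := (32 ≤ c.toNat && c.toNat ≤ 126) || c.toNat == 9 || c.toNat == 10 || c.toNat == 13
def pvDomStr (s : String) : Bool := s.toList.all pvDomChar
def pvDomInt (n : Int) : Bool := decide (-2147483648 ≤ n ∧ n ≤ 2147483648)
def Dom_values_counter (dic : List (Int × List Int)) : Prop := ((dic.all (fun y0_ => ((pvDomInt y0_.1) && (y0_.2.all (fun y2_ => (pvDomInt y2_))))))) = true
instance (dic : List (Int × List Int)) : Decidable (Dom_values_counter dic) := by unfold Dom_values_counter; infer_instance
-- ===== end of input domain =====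

-- B replaces A's sort-of-pairs + dict-accumulator counting (with per-iteration list(dic)/list(counter) rebuilds) by a run-length scan of the sorted label list (objective: faster, measured).

-- ===== PORT A =====
-- order_vector(dic, pos): skips the entry whose key equals list(dic)[0], collects [line[1][pos], line[1][-1]]
-- (a pair here), then sorts; sorted() of 2-element lists compares lexicographically = sorted2 with fst,snd keys.
-- line[1][pos] raises IndexError on an empty value list — excluded by Pre_; the .getD 0 there is never
-- observed on admitted inputs.
def order_vector (dic : List (Int × List Int)) (pos : Int) : List (Int × Int) :=
  let v1 := dic.foldl (fun v1 line =>
    if PySem.List.pyGet? (dic.map Prod.fst) 0 = some line.1 then v1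
    else v1 ++ [((PySem.List.pyGet? line.2 pos).getD 0, (PySem.List.pyGet? line.2 (-1)).getD 0)]) []
  PySem.List.sorted2 v1 Prod.fst Prod.snd

-- the counter loop: 'if not(value[-1] in list(counter)): counter[value[-1]] = 0; counter[value[-1]] += 1';
-- value[-1] of the 2-element list is .2; 'counter[k] += 1' reads a key that is certainly present, so getD 0 is exact.
def values_counter (dic : List (Int × List Int)) : List (Int × Int) :=
  let vec := order_vector dic (-1)
  (vec.foldl (fun counter value =>
      let counter := if counter.contains value.2 then counter else counter.insert value.2 0
      counter.insert value.2 (counter.getD value.2 0 + 1))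
    (PySem.Dict.empty : PySem.Dict Int Int)).items

-- ===== PORT B =====
-- inner while: 'run = 1; while run < len(rest) and rest[run] == rest[0]: run += 1' — run - 1 is the
-- length of the maximal prefix of rest[1:] equal to rest[0]; countEq head t computes that length.
def countEq (head : Int) : List Int → Nat
  | [] => 0
  | x :: t => if x = head then countEq head t + 1 else 0

-- outer while: 'while rest: … out[rest[0]] = run; rest = rest[run:]'; each step consumes at least
-- one element, so the loop runs at most len(labels) times — fuel = len(labels) makes that structural.
def runsLoop : Nat → List Int → PySem.Dict Int Int → PySem.Dict Int Int
  | _, [], out => out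
  | 0, _ :: _, out => out
  | fuel + 1, head :: t, out =>
      runsLoop fuel (t.drop (countEq head t)) (out.insert head ((countEq head t + 1 : Nat) : Int))

-- labels = sorted(v[-1] for v in list(dic.values())[1:]); then the run-length scan fills 'out'
def values_counter_alt (dic : List (Int × List Int)) : List (Int × Int) :=
  let labels := PySem.List.sorted ((PySem.List.slice (dic.map Prod.snd) (some 1) none).map
    (fun v => (PySem.List.pyGet? v (-1)).getD 0)) (fun x => x)
  (runsLoop labels.length labels (PySem.Dict.empty : PySem.Dict Int Int)).items

-- ===== PRECONDITION & SPEC =====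
-- Pre_ excludes (a) association lists with duplicate keys, which do not represent a Python dict, and
-- (b) inputs where some value list after the first entry is empty, on which A raises IndexError (v[-1]).
def Pre_values_counter (dic : List (Int × List Int)) : Prop :=
  (dic.map Prod.fst).Nodup ∧ ∀ p ∈ dic.drop 1, p.2 ≠ []
instance (dic : List (Int × List Int)) : Decidable (Pre_values_counter dic) := by
  unfold Pre_values_counter; infer_instance
def pvWitness_values_counter : (List (Int × List Int)) := [(1, [2]), (3, [0, 4]), (5, [4])]
def Spec_values_counter (dic : List (Int × List Int)) (out : List (Int × Int)) : Prop := out = values_counter_alt dic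
instance (dic : List (Int × List Int)) (out : List (Int × Int)) : Decidable (Spec_values_counter dic out) := by unfold Spec_values_counter; infer_instance

-- ===== CLAIM (what is proved, stated in full; the proofs are below) =====
def Claim_equal_values_counter : Prop := ∀ (dic : List (Int × List Int)), Dom_values_counter dic → Pre_values_counter dic → Spec_values_counter dic (values_counter dic)

-- ===== LEMMAS AND PROOFS =====

-- the 'continue'-shaped fold is the filtered map
theorem foldl_skip_append {α β : Type} (c : α → Prop) [DecidablePred c] (f : α → β)
    (l : List α) (acc : List β) :
    l.foldl (fun acc x => if c x then acc else acc ++ [f x]) acc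
      = acc ++ (l.filter (fun x => decide (¬ c x))).map f := by
  have h : (fun (acc : List β) x => if c x then acc else acc ++ [f x])
      = fun acc x => if ¬ c x then acc ++ [f x] else acc := by
    funext a x; by_cases hx : c x <;> simp [hx]
  rw [h, PySem.List.foldl_append_ite]

theorem insertBy_map_diag (lt2 : Int × Int → Int × Int → Bool) (lt1 : Int → Int → Bool)
    (h : ∀ a b, lt2 (a, a) (b, b) = lt1 a b) (x : Int) (ys : List Int) :
    PySem.List.insertBy lt2 (x, x) (ys.map (fun a => (a, a)))
      = (PySem.List.insertBy lt1 x ys).map (fun a => (a, a)) := by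
  induction ys with
  | nil => simp [PySem.List.insertBy]
  | cons y t ih =>
    simp only [List.map_cons, PySem.List.insertBy, h]
    by_cases hb : lt1 x y <;> simp [hb, ih]

theorem foldl_insertBy_map_diag (lt2 : Int × Int → Int × Int → Bool) (lt1 : Int → Int → Bool)
    (h : ∀ a b, lt2 (a, a) (b, b) = lt1 a b) (ys acc : List Int) :
    (ys.map (fun a => (a, a))).foldl (fun s x => PySem.List.insertBy lt2 x s) (acc.map (fun a => (a, a)))
      = (ys.foldl (fun s x => PySem.List.insertBy lt1 x s) acc).map (fun a => (a, a)) := by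
  induction ys generalizing acc with
  | nil => rfl
  | cons y t ih =>
    simp only [List.map_cons, List.foldl_cons]
    rw [insertBy_map_diag lt2 lt1 h, ih]

-- sorting diagonal pairs lexicographically is sorting the labels
theorem sorted2_map_diag (ys : List Int) :
    PySem.List.sorted2 (ys.map (fun a => (a, a))) Prod.fst Prod.snd
      = (PySem.List.sorted ys (fun x => x)).map (fun a => (a, a)) := by
  simp only [PySem.List.sorted2, PySem.List.sorted]
  have := foldl_insertBy_map_diag
    (fun a b => decide (a.1 < b.1) || (!decide (b.1 < a.1) && decide (a.2 < b.2)))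
    (fun a b => decide (a < b))
    (by intro a b; by_cases h : a < b <;> simp [h]) ys []
  simpa using this

-- A's counter body is the standard 'd[x] = d.get(x,0)+1' counting step
theorem counter_loop_eq (vec : List (Int × Int)) :
    vec.foldl (fun counter value =>
        (if counter.contains value.2 then counter else counter.insert value.2 0).insert value.2
          ((if counter.contains value.2 then counter else counter.insert value.2 0).getD value.2 0 + 1))
      (PySem.Dict.empty : PySem.Dict Int Int)
      = PySem.Dict.counter (vec.map Prod.snd) := by
  rw [← PySem.Dict.foldl_insert_getD_add_one_eq_counter, List.foldl_map]
  have h : (fun (d : PySem.Dict Int Int) (value : Int × Int) =>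
        (if d.contains value.2 then d else d.insert value.2 0).insert value.2
          ((if d.contains value.2 then d else d.insert value.2 0).getD value.2 0 + 1))
      = fun d value => d.insert value.2 (d.getD value.2 0 + 1) := by
    funext d v
    by_cases hc : d.contains v.2 = true
    · simp only [hc, if_true]
    · have hc' : d.contains v.2 = false := by simpa using hc
      rw [if_neg hc, PySem.Dict.getD_insert_self, PySem.Dict.insert_insert_self]
      simp [PySem.Dict.getD_of_not_contains, hc']
  rw [h]

-- countEq bounds and characterisation of the equal prefix
theorem countEq_le (head : Int) (t : List Int) : countEq head t ≤ t.length := by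
  induction t with
  | nil => simp [countEq]
  | cons x s ih => by_cases h : x = head <;> simp [countEq, h] <;> omega

theorem take_countEq (head : Int) (t : List Int) :
    ∀ a ∈ t.take (countEq head t), a = head := by
  induction t with
  | nil => simp
  | cons x s ih =>
    by_cases h : x = head
    · simpa [countEq, h] using ih
    · simp [countEq, h]

theorem drop_countEq_head_ne (head : Int) (t : List Int) :
    ∀ h ∈ (t.drop (countEq head t)).head?, h ≠ head := by
  induction t with
  | nil => simp
  | cons x s ih =>
    by_cases h : x = head
    · simpa [countEq, h] using ih
    · simpa [countEq, h] using h

-- x stays at the front of the accumulator of a Set.add fold when it never reappears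
theorem foldl_add_cons {α : Type} [BEq α] [LawfulBEq α] (l : List α) (x : α) (hx : x ∉ l) :
    ∀ s : List α, l.foldl PySem.Set.add (x :: s) = x :: l.foldl PySem.Set.add s := by
  induction l with
  | nil => intro s; rfl
  | cons y t ih =>
    intro s
    have hyx : y ≠ x := fun h => hx (h ▸ List.mem_cons_self)
    have hxt : x ∉ t := fun h => hx (List.mem_cons_of_mem _ h)
    have hstep : PySem.Set.add (x :: s) y = x :: PySem.Set.add s y := by
      by_cases hm : y ∈ s
      · rw [PySem.Set.add_of_mem hm, PySem.Set.add_of_mem (List.mem_cons_of_mem _ hm)]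
      · rw [PySem.Set.add_of_not_mem hm, PySem.Set.add_of_not_mem (by simp [hyx, hm])]
        rfl
    simp only [List.foldl_cons, hstep, ih hxt]

-- adding elements already present is a no-op
theorem foldl_add_const {α : Type} [BEq α] [LawfulBEq α] (l : List α) (s : List α)
    (h : ∀ a ∈ l, a ∈ s) : l.foldl PySem.Set.add s = s := by
  induction l with
  | nil => rfl
  | cons y t ih =>
    simp only [List.foldl_cons, PySem.Set.add_of_mem (h y List.mem_cons_self)]
    exact ih (fun a ha => h a (List.mem_cons_of_mem _ ha))

-- set(head :: eq-prefix ++ rest) = head :: set(rest), when the prefix is all head and head ∉ rest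
theorem ofList_run_cons (head : Int) (pre rest : List Int)
    (hpre : ∀ a ∈ pre, a = head) (hrest : head ∉ rest) :
    PySem.Set.ofList (head :: (pre ++ rest)) = head :: PySem.Set.ofList rest := by
  rw [PySem.Set.ofList_eq_foldl, PySem.Set.ofList_eq_foldl]
  simp only [List.foldl_cons, List.foldl_append]
  have h0 : PySem.Set.add ([] : List Int) head = [head] := by
    rw [PySem.Set.add_of_not_mem (by simp)]; rfl
  rw [h0, foldl_add_const pre [head] (fun a ha => by simp [hpre a ha]),
      foldl_add_cons rest head hrest]

-- run-length scan over a sorted list of fresh labels appends (label, multiplicity) pairs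
theorem runsLoop_items (n : Nat) : ∀ (l : List Int) (d : PySem.Dict Int Int),
    l.length ≤ n → l.Pairwise (· ≤ ·) → (∀ a ∈ l, d.contains a = false) →
    (runsLoop n l d).items
      = d.items ++ (PySem.Set.ofList l).map (fun k => (k, (l.count k : Int))) := by
  induction n with
  | zero =>
    intro l d hlen _ _
    have hl : l = [] := List.eq_nil_of_length_eq_zero (Nat.le_zero.mp hlen)
    subst hl
    simp [runsLoop, PySem.Set.ofList]
  | succ n ihn =>
    intro l d hlen hs hf
    match l with
    | [] => simp [runsLoop, PySem.Set.ofList]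
    | head :: t =>
    have ih : ∀ d' : PySem.Dict Int Int,
        (t.drop (countEq head t)).Pairwise (· ≤ ·) →
        (∀ a ∈ t.drop (countEq head t), d'.contains a = false) →
        (runsLoop n (t.drop (countEq head t)) d').items
          = d'.items ++ (PySem.Set.ofList (t.drop (countEq head t))).map
              (fun k => (k, ((t.drop (countEq head t)).count k : Int))) := by
      intro d' h1 h2
      refine ihn _ d' ?_ h1 h2
      have := List.length_drop (l := t) (i := countEq head t)
      simp only [List.length_cons] at hlen
      omega
    have hc := countEq_le head t
    have hsplit : t = t.take (countEq head t) ++ t.drop (countEq head t) := by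
      simp
    set pre := t.take (countEq head t) with hpreDef
    set rest := t.drop (countEq head t) with hrestDef
    have hpre : ∀ a ∈ pre, a = head := take_countEq head t
    have hpreLen : pre.length = countEq head t := by
      simp [hpreDef, hc]
    -- head ∉ rest: the first element of rest differs from head and the list is sorted upward
    have hsorted_t : t.Pairwise (· ≤ ·) := (List.pairwise_cons.mp hs).2
    have hhead_le : ∀ a ∈ t, head ≤ a := (List.pairwise_cons.mp hs).1
    have hrest_pw : rest.Pairwise (· ≤ ·) := hsorted_t.sublist (List.drop_sublist _ _)
    have hrest : head ∉ rest := by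
      intro hmem
      cases hr : rest with
      | nil => rw [hr] at hmem; simp at hmem
      | cons r rs =>
        have hrne : r ≠ head := drop_countEq_head_ne head t r (by simp [hrestDef ▸ hr])
        have hhr : head ≤ r := hhead_le r (by
          have : r ∈ rest := by rw [hr]; exact List.mem_cons_self
          exact (hsplit ▸ List.mem_append_right pre this))
        have hlt : head < r := lt_of_le_of_ne hhr (Ne.symm hrne)
        rw [hr] at hmem
        rcases List.mem_cons.mp hmem with h1 | h2
        · exact absurd h1.symm hrne
        · have : r ≤ head := by
            have hp := List.pairwise_cons.mp (hr ▸ hrest_pw)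
            exact hp.1 head h2
          omega
    -- counts
    have hpre_count : pre.count head = pre.length := List.count_eq_length.mpr (fun a ha => by
      simp [hpre a ha])
    have hrest_count : rest.count head = 0 := List.count_eq_zero.mpr hrest
    have htc : t.count head = countEq head t := by
      calc t.count head = (pre ++ rest).count head := by rw [← hsplit]
        _ = pre.count head + rest.count head := by simp
        _ = countEq head t := by rw [hpre_count, hrest_count, hpreLen]; omega
    have hcount_head : (head :: t).count head = (countEq head t + 1 : Nat) := by
      simp [htc]
    have hcount_rest : ∀ k ∈ rest, (head :: t).count k = rest.count k := by
      intro k hk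
      have hkne : k ≠ head := by
        intro h; exact hrest (h ▸ hk)
      have hpk : pre.count k = 0 := List.count_eq_zero.mpr (fun hm => hkne (hpre k hm))
      have htk : t.count k = rest.count k := by
        calc t.count k = (pre ++ rest).count k := by rw [← hsplit]
          _ = pre.count k + rest.count k := by simp
          _ = rest.count k := by rw [hpk]; omega
      have hhk : ¬ head = k := fun h => hkne h.symm
      simp [htk, hhk]
    -- freshness for the recursive call
    have hf' : ∀ a ∈ rest, (d.insert head ((countEq head t + 1 : Nat) : Int)).contains a = false := by
      intro a ha
      have hane : a ≠ head := fun h => hrest (h ▸ ha)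
      rw [PySem.Dict.contains_insert]
      have hda : d.contains a = false :=
        hf a (hsplit ▸ List.mem_cons_of_mem _ (List.mem_append_right pre ha))
      simp [hane, hda]
    have hitems : (d.insert head ((countEq head t + 1 : Nat) : Int)).items
        = d.items ++ [(head, ((countEq head t + 1 : Nat) : Int))] :=
      PySem.Dict.items_insert_of_not_contains _ _ (hf head List.mem_cons_self)
    rw [runsLoop, ih _ hrest_pw hf', hitems]
    have hof : PySem.Set.ofList (head :: t) = head :: PySem.Set.ofList rest := by
      rw [show head :: t = head :: (pre ++ rest) from by rw [← hsplit]]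
      exact ofList_run_cons head pre rest hpre hrest
    rw [hof, List.map_cons, hcount_head]
    have hmapeq : (PySem.Set.ofList rest).map (fun k => (k, ((head :: t).count k : Int)))
        = (PySem.Set.ofList rest).map (fun k => (k, (rest.count k : Int))) := by
      refine List.map_congr_left (fun k hk => ?_)
      rw [hcount_rest k ((PySem.Set.mem_ofList _ _).mp hk)]
    rw [hmapeq]
    simp

-- ===== VERDICT (by name: the statement is the Claim_ definition above) =====
theorem values_counter_spec : Claim_equal_values_counter := by
  intro dic _ hpre
  obtain ⟨hnd, _⟩ := hpre
  unfold Spec_values_counter values_counter values_counter_alt order_vector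
  cases dic with
  | nil => decide
  | cons p0 rest =>
    dsimp only
    rw [List.map_cons, List.nodup_cons] at hnd
    have hnd0 : p0.1 ∉ rest.map Prod.fst := hnd.1
    -- A's v1 is the diagonal pairs of the tail labels
    have hv1 : (p0 :: rest).foldl (fun v1 line =>
        if PySem.List.pyGet? ((p0 :: rest).map Prod.fst) 0 = some line.1 then v1
        else v1 ++ [((PySem.List.pyGet? line.2 (-1)).getD 0, (PySem.List.pyGet? line.2 (-1)).getD 0)]) []
        = (rest.map (fun p => (PySem.List.pyGet? p.2 (-1)).getD 0)).map (fun a => (a, a)) := by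
      rw [foldl_skip_append]
      have hfilter : (p0 :: rest).filter
          (fun x => decide (¬ PySem.List.pyGet? ((p0 :: rest).map Prod.fst) 0 = some x.1)) = rest := by
        rw [List.filter_cons_of_neg (by simp [PySem.List.pyGet?, PySem.List.pyIdx?])]
        refine List.filter_eq_self.mpr (fun q hq => ?_)
        have hne : ¬ (p0.1 = q.1) := fun h => hnd0 (by rw [h]; exact List.mem_map_of_mem hq)
        simp [PySem.List.pyGet?, PySem.List.pyIdx?, hne]
      rw [hfilter, List.map_map]
      rfl
    rw [hv1, sorted2_map_diag, counter_loop_eq, List.map_map]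
    have hsnd : (PySem.List.sorted (rest.map (fun p => (PySem.List.pyGet? p.2 (-1)).getD 0)) (fun x => x)).map
        (Prod.snd ∘ (fun a => ((a, a) : Int × Int)))
        = PySem.List.sorted (rest.map (fun p => (PySem.List.pyGet? p.2 (-1)).getD 0)) (fun x => x) := by
      rw [show (Prod.snd ∘ fun a => ((a, a) : Int × Int)) = id from rfl, List.map_id]
    rw [hsnd]
    -- B's labels are the same list
    have hlabels : (PySem.List.slice ((p0 :: rest).map Prod.snd) (some 1) none).map
        (fun v => (PySem.List.pyGet? v (-1)).getD 0)
        = rest.map (fun p => (PySem.List.pyGet? p.2 (-1)).getD 0) := by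
      rw [List.map_cons, PySem.List.slice_from _ (by norm_num)]
      simp only [Int.toNat_one, List.drop_succ_cons, List.drop_zero, List.map_map]
      rfl
    rw [hlabels]
    -- both sides: the ascending distinct labels paired with their multiplicities
    set L : List Int := rest.map (fun p => (PySem.List.pyGet? p.2 (-1)).getD 0) with hL
    rw [PySem.Dict.items_counter,
        runsLoop_items _ _ _ le_rfl (PySem.List.sorted_pairwise L (fun x => x)) (by intro a _; rfl),
        show (PySem.Dict.empty : PySem.Dict Int Int).items = [] from rfl]
    simp
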